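-- pv_equiv track=rewrite | github.com/kruuZHAW/atc_clearances | utils/cs_matching.py | callsign_match_score
-- ===== SOURCE A (Python) =====
-- from typing import Optional, Tuple, List
--
-- def callsign_match_score(words_line: List[str], callsign_words: List[str]) -> int:
--     best_score = 0
--     for start in range(len(callsign_words)):
--         trimmed = callsign_words[start:]
--         i = j = score = 0
--         while i < len(words_line) and j < len(trimmed):
--             if words_line[i] == trimmed[j]:
--                 score += 1
--                 j += 1
--             i += 1
--         best_score = max(best_score, score)
--     return best_score
-- ===== SOURCE B (Python) =====
-- from typing import List
--
-- def _build_index(words_line):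
--     # occurrence index: word -> list of its positions in the line, in increasing order
--     occ = {}
--     for i, w in enumerate(words_line):
--         occ[w] = occ.get(w, []) + [i]
--     return occ
--
-- def _first_at_or_after(positions, p):
--     for q in positions:
--         if q >= p:
--             return q
--     return None
--
-- def callsign_match_score(words_line: List[str], callsign_words: List[str]) -> int:
--     occ = _build_index(words_line)
--     best = 0
--     for start in range(len(callsign_words)):
--         p = 0
--         score = 0
--         for c in callsign_words[start:]:
--             q = _first_at_or_after(occ.get(c, []), p)
--             if q is None:
--                 break
--             score += 1
--             p = q + 1
--         best = max(best, score)
--     return best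
-- ===== Notes on version B (the rewrite author's own statement) =====
-- stated objective: alternative
-- what changed: B builds an occurrence index (word -> sorted position list) of the line once and greedily matches each callsign suffix against the occurrence lists with a monotone position pointer, instead of A's rescan of the whole line for every start.
import Mathlib
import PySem

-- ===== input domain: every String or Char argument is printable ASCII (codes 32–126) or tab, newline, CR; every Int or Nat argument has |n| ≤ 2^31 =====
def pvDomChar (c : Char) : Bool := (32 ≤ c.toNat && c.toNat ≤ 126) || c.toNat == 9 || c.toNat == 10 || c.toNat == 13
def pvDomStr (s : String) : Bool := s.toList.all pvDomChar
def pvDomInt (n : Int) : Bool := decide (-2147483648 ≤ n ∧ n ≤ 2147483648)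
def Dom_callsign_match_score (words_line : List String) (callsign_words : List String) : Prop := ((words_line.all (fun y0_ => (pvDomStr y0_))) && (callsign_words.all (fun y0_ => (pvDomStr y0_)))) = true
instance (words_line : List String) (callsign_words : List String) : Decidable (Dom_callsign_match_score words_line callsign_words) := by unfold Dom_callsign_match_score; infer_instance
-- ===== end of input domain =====

-- B replaces A's per-start rescan of the whole line by an occurrence index (word -> positions)
-- built once; each callsign word is matched against its occurrence list only (objective: alternative).

-- ===== PORT A =====
-- the 'while i < len(words_line) and j < len(trimmed)' loop of A; i, j, score as in A
def pvAWhile (words_line trimmed : List String) (i j : Nat) (score : Int) : Int :=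
  if h : i < words_line.length ∧ j < trimmed.length then
    if words_line[i] = trimmed[j] then
      pvAWhile words_line trimmed (i + 1) (j + 1) (score + 1)
    else
      pvAWhile words_line trimmed (i + 1) j score
  else score
termination_by words_line.length - i
decreasing_by all_goals omega

def callsign_match_score (words_line : List String) (callsign_words : List String) : Int :=
  -- for start in range(len(callsign_words)): trimmed = callsign_words[start:] (a slice from a
  -- nonnegative in-range start = List.drop); best_score = max(best_score, score)
  (List.range callsign_words.length).foldl
    (fun best_score start => max best_score (pvAWhile words_line (callsign_words.drop start) 0 0 0))
    0

-- ===== PORT B =====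
-- helper _build_index: occ[w] = occ.get(w, []) + [i] over enumerate(words_line)
def pvOccDict (words_line : List String) : PySem.Dict String (List Int) :=
  (PySem.List.enumerate words_line 0).foldl
    (fun d iw => d.modify iw.2 [] (· ++ [iw.1])) PySem.Dict.empty

-- helper _first_at_or_after: first element of positions that is ≥ p, else None
def pvFirstGe (positions : List Int) (p : Int) : Option Int :=
  match positions with
  | [] => none
  | q :: t => if q ≥ p then some q else pvFirstGe t p

-- the inner 'for c in callsign_words[start:] … break' loop of B
def pvBInner (occ : PySem.Dict String (List Int)) (cs : List String) (p score : Int) : Int :=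
  match cs with
  | [] => score
  | c :: t =>
    match pvFirstGe (occ.getD c []) p with
    | none => score
    | some q => pvBInner occ t (q + 1) (score + 1)

def callsign_match_score_alt (words_line : List String) (callsign_words : List String) : Int :=
  let occ := pvOccDict words_line
  (List.range callsign_words.length).foldl
    (fun best start => max best (pvBInner occ (callsign_words.drop start) 0 0))
    0

-- ===== PRECONDITION & SPEC =====
def Spec_callsign_match_score (words_line : List String) (callsign_words : List String) (out : Int) : Prop := out = callsign_match_score_alt words_line callsign_words
instance (words_line : List String) (callsign_words : List String) (out : Int) : Decidable (Spec_callsign_match_score words_line callsign_words out) := by unfold Spec_callsign_match_score; infer_instance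

-- ===== CLAIM (what is proved, stated in full; the proofs are below) =====
def Claim_equal_callsign_match_score : Prop := ∀ (words_line : List String) (callsign_words : List String), Dom_callsign_match_score words_line callsign_words → Spec_callsign_match_score words_line callsign_words (callsign_match_score words_line callsign_words)

-- ===== LEMMAS AND PROOFS =====

-- common specification: greedy count of the longest prefix of cs matchable as a subsequence of ws
def pvGreedy (ws cs : List String) : Int :=
  match ws, cs with
  | _, [] => 0
  | [], _ :: _ => 0
  | w :: ws', c :: cs' => if w = c then 1 + pvGreedy ws' cs' else pvGreedy ws' (c :: cs')

-- positions of the occurrences of c in ws, indices starting at k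
def pvPosFrom (ws : List String) (c : String) (k : Int) : List Int :=
  match ws with
  | [] => []
  | w :: t => if w = c then k :: pvPosFrom t c (k + 1) else pvPosFrom t c (k + 1)

theorem pvGreedy_nil_cs (ws : List String) : pvGreedy ws [] = 0 := by
  cases ws <;> simp [pvGreedy]

-- fold the one-step unfolding of pvBInner back into pvBInner
theorem pvBInner_cons_eq (occ : PySem.Dict String (List Int)) (c : String) (cs' : List String)
    (p score : Int) :
    (match pvFirstGe (occ.getD c []) p with
      | none => score
      | some q => pvBInner occ cs' (q + 1) (score + 1))
      = pvBInner occ (c :: cs') p score := rfl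

-- ---- A side: the while loop computes pvGreedy on the remaining suffixes ----
theorem pvAWhile_eq (ws tr : List String) (i j : Nat) (score : Int) :
    pvAWhile ws tr i j score = score + pvGreedy (ws.drop i) (tr.drop j) := by
  fun_induction pvAWhile ws tr i j score with
  | case1 i j score h heq ih =>
    rw [ih, List.drop_eq_getElem_cons h.1, List.drop_eq_getElem_cons h.2, pvGreedy, if_pos heq]
    ring
  | case2 i j score h heq ih =>
    rw [ih, List.drop_eq_getElem_cons h.1, List.drop_eq_getElem_cons h.2, pvGreedy, if_neg heq,
      ← List.drop_eq_getElem_cons h.2]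
  | case3 i j score h =>
    rcases Decidable.not_and_iff_or_not.mp h with h' | h'
    · have hws : ws.drop i = [] := List.drop_eq_nil_of_le (by omega)
      rw [hws]
      cases tr.drop j <;> simp [pvGreedy]
    · have htr : tr.drop j = [] := List.drop_eq_nil_of_le (by omega)
      rw [htr, pvGreedy_nil_cs]
      omega

-- ---- B side: the occurrence dictionary holds exactly pvPosFrom ----
theorem pvOcc_filter (ws : List String) (c : String) (k : Int) :
    ((((PySem.List.enumerate ws k).map Prod.swap).filter (fun p => p.1 == c)).map (·.2))
      = pvPosFrom ws c k := by
  induction ws generalizing k with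
  | nil => simp [PySem.List.enumerate_nil, pvPosFrom]
  | cons w t ih =>
    rw [PySem.List.enumerate_cons]
    by_cases hw : w = c
    · simp [pvPosFrom, hw, ih (k + 1)]
    · simp [pvPosFrom, hw, ih (k + 1)]

theorem pvOcc_getD (ws : List String) (c : String) :
    (pvOccDict ws).getD c [] = pvPosFrom ws c 0 := by
  have hfold : pvOccDict ws
      = (((PySem.List.enumerate ws 0).map Prod.swap).foldl
        (fun d p => d.modify p.1 [] (· ++ [p.2])) PySem.Dict.empty) := by
    rw [List.foldl_map]
    rfl
  rw [hfold, PySem.Dict.getD_foldl_modify_append, PySem.Dict.getD_empty]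
  simpa using pvOcc_filter ws c 0

-- every element of pvPosFrom ws c k is ≥ k, so pvFirstGe is the same for any bound ≤ k
theorem pvFirstGe_posFrom_le (ws : List String) (c : String) (k p p' : Int)
    (hp : p ≤ k) (hp' : p' ≤ k) :
    pvFirstGe (pvPosFrom ws c k) p = pvFirstGe (pvPosFrom ws c k) p' := by
  induction ws generalizing k with
  | nil => simp [pvPosFrom, pvFirstGe]
  | cons w t ih =>
    by_cases hw : w = c
    · rw [pvPosFrom, if_pos hw, pvFirstGe, if_pos (by omega), pvFirstGe, if_pos (by omega)]
    · rw [pvPosFrom, if_neg hw]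
      exact ih (k + 1) (by omega) (by omega)

-- skipping the first (p - k) words does not change the occurrences at or after p
theorem pvFirstGe_posFrom_drop (ws : List String) (c : String) (k p : Int) (hkp : k ≤ p) :
    pvFirstGe (pvPosFrom ws c k) p
      = pvFirstGe (pvPosFrom (ws.drop (p - k).toNat) c p) p := by
  induction ws generalizing k with
  | nil => simp [pvPosFrom]
  | cons w t ih =>
    rcases eq_or_lt_of_le hkp with h | h
    · subst h; simp
    · have hd : (w :: t).drop (p - k).toNat = t.drop (p - (k + 1)).toNat := by
        rw [show (p - k).toNat = (p - (k + 1)).toNat + 1 by omega]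
        rfl
      by_cases hw : w = c
      · rw [pvPosFrom, if_pos hw, pvFirstGe, if_neg (by omega), ih (k + 1) (by omega), hd]
      · rw [pvPosFrom, if_neg hw, ih (k + 1) (by omega), hd]

-- ---- the inner loop of B computes pvGreedy ----
theorem pvBInner_eq (ws : List String) (cs : List String) (p : Nat) (score : Int) :
    pvBInner (pvOccDict ws) cs (p : Int) score = score + pvGreedy (ws.drop p) cs := by
  induction cs generalizing p score with
  | nil => simp [pvBInner, pvGreedy_nil_cs]
  | cons c cs' ihcs =>
    suffices H : ∀ n p score, ws.length - p ≤ n →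
        pvBInner (pvOccDict ws) (c :: cs') ((p : Nat) : Int) score
          = score + pvGreedy (ws.drop p) (c :: cs') by
      exact H (ws.length - p) p score le_rfl
    intro n
    induction n with
    | zero =>
      intro p score hn
      have hnil : ws.drop p = ([] : List String) := List.drop_eq_nil_of_le (by omega)
      rw [pvBInner, pvOcc_getD, pvFirstGe_posFrom_drop ws c 0 p (by omega),
        show (((p : Nat) : Int) - 0).toNat = p by omega, hnil]
      simp [pvPosFrom, pvFirstGe, pvGreedy]
    | succ n ihn =>
      intro p score hn
      by_cases hp : p < ws.length
      · have hdrop : ws.drop p = ws[p] :: ws.drop (p + 1) := List.drop_eq_getElem_cons hp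
        rw [pvBInner, pvOcc_getD, pvFirstGe_posFrom_drop ws c 0 p (by omega),
          show (((p : Nat) : Int) - 0).toNat = p by omega, hdrop]
        by_cases hw : ws[p] = c
        · rw [pvPosFrom, if_pos hw, pvFirstGe, if_pos (by omega)]
          change pvBInner (pvOccDict ws) cs' (((p : Nat) : Int) + 1) (score + 1) = _
          rw [show (((p : Nat) : Int) + 1) = (((p + 1 : Nat)) : Int) by omega,
            ihcs (p + 1) (score + 1), pvGreedy, if_pos hw]
          ring
        · rw [pvPosFrom, if_neg hw]
          have h1 : pvFirstGe (pvPosFrom (ws.drop (p + 1)) c (((p : Nat) : Int) + 1))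
                ((p : Nat) : Int)
              = pvFirstGe ((pvOccDict ws).getD c []) (((p + 1 : Nat)) : Int) := by
            rw [show (((p : Nat) : Int) + 1) = (((p + 1 : Nat)) : Int) by omega,
              pvFirstGe_posFrom_le (ws.drop (p + 1)) c (((p + 1 : Nat)) : Int)
                ((p : Nat) : Int) (((p + 1 : Nat)) : Int) (by omega) (by omega),
              pvOcc_getD, pvFirstGe_posFrom_drop ws c 0 (((p + 1 : Nat)) : Int) (by omega),
              show ((((p + 1 : Nat)) : Int) - 0).toNat = p + 1 by omega]
          rw [h1, pvBInner_cons_eq, ihn (p + 1) score (by omega), pvGreedy, if_neg hw]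
      · have hnil : ws.drop p = ([] : List String) := List.drop_eq_nil_of_le (by omega)
        rw [pvBInner, pvOcc_getD, pvFirstGe_posFrom_drop ws c 0 p (by omega),
          show (((p : Nat) : Int) - 0).toNat = p by omega, hnil]
        simp [pvPosFrom, pvFirstGe, pvGreedy]

theorem pvBInner_zero (ws cs : List String) :
    pvBInner (pvOccDict ws) cs 0 0 = pvGreedy ws cs := by
  simpa using pvBInner_eq ws cs 0 0

-- ===== VERDICT (by name: the statement is the Claim_ definition above) =====
theorem callsign_match_score_spec : Claim_equal_callsign_match_score := by
  intro ws cs _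
  unfold Spec_callsign_match_score callsign_match_score callsign_match_score_alt
  have hfun : (fun (best : Int) (start : Nat) =>
        max best (pvAWhile ws (cs.drop start) 0 0 0))
      = (fun best start => max best (pvBInner (pvOccDict ws) (cs.drop start) 0 0)) := by
    funext best start
    rw [pvAWhile_eq, pvBInner_zero]
    simp
  rw [hfun]
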